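-- pv_equiv track=rewrite | github.com/lmp-decaderan/Evolutionary-Strategies | weight_get_normal_distribution.py | get_sentence_level
-- ===== SOURCE A (Python) =====
-- def get_sentence_level(datalist = None):
--     level_th = [20,30,40]
--     result = []
--     for key in datalist:
--         if key < level_th[0]:
--             result.append(0)
--         elif key < level_th[1]:
--             result.append(1)
--         elif key < level_th[2]:
--             result.append(2)
--         else:
--             result.append(3)
--     if len(datalist) == len(result):
--         return result
--     else:
--         raise
-- ===== SOURCE B (Python) =====
-- def get_sentence_level(datalist=None):
--     level_th = [20, 30, 40]
--     return [sum(key >= t for t in level_th) for key in datalist]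
-- ===== Notes on version B (the rewrite author's own statement) =====
-- stated objective: idiomatic
-- what changed: Replaces the elif threshold cascade with a table-driven count: each element's level is the number of of the three thresholds (20, then 30, then 40) it is >=, built by a comprehension; the always-true length check and its unreachable raise are dropped.
import Mathlib
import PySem

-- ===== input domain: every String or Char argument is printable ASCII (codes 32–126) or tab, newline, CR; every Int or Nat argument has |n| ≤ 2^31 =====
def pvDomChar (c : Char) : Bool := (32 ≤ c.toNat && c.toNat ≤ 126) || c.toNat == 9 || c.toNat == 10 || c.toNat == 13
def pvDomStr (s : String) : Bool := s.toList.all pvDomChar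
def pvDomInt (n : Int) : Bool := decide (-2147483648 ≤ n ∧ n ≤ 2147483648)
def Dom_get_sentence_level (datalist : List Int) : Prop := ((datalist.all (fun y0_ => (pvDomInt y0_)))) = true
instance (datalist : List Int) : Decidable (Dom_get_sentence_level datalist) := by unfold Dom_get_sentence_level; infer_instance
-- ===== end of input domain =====

-- ===== PORT A =====
-- Port of A: fold over datalist appending the level from the elif cascade;
-- the final length check is always true in Python (result gets one entry per key),
-- so the bare-raise branch is unreachable and ported as returning result as well.
def get_sentence_level (datalist : List Int) : List Int :=
  let level_th : List Int := [20, 30, 40]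
  let result := datalist.foldl (fun result key =>
    if key < level_th[0]! then result ++ [0]
    else if key < level_th[1]! then result ++ [1]
    else if key < level_th[2]! then result ++ [2]
    else result ++ [3]) []
  if (datalist.length : Int) = result.length then result else result

-- ===== PORT B =====
-- Port of B: per key, count the thresholds it is >= (sum of booleans).
def get_sentence_level_alt (datalist : List Int) : List Int :=
  let level_th : List Int := [20, 30, 40]
  datalist.map (fun key => level_th.foldl (fun acc t => acc + (if key >= t then 1 else 0)) 0)

-- ===== PRECONDITION & SPEC =====
def Spec_get_sentence_level (datalist : List Int) (out : List Int) : Prop := out = get_sentence_level_alt datalist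
instance (datalist : List Int) (out : List Int) : Decidable (Spec_get_sentence_level datalist out) := by unfold Spec_get_sentence_level; infer_instance

-- ===== CLAIM (what is proved, stated in full; the proofs are below) =====
def Claim_equal_get_sentence_level : Prop := ∀ (datalist : List Int), Dom_get_sentence_level datalist → Spec_get_sentence_level datalist (get_sentence_level datalist)

-- ===== LEMMAS AND PROOFS =====

-- ===== VERDICT (by name: the statement is the Claim_ definition above) =====
-- Loop invariant: A's fold over the remaining list appends exactly B's map.
theorem pv_fold_eq (l : List Int) (acc : List Int) :
    l.foldl (fun result key =>
      if key < (20:Int) then result ++ [0]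
      else if key < 30 then result ++ [1]
      else if key < 40 then result ++ [2]
      else result ++ [3]) acc
    = acc ++ l.map (fun key => ([20,30,40] : List Int).foldl
        (fun acc t => acc + (if key >= t then 1 else 0)) 0) := by
  induction l generalizing acc with
  | nil => simp
  | cons k tl ih =>
    simp only [List.foldl_cons, List.map_cons, ih]
    split_ifs with h1 h2 h3 <;> simp [List.foldl] <;> omega

theorem get_sentence_level_spec : Claim_equal_get_sentence_level := by
  intro datalist _
  unfold Spec_get_sentence_level get_sentence_level get_sentence_level_alt
  simp only [List.getElem!_cons_zero, List.getElem!_cons_succ]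
  rw [pv_fold_eq]
  simp
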